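-- pv_equiv track=rewrite | github.com/huiling-y/JSEEGraph | preprocess/preprocess_ace.py | recover_tags
-- ===== SOURCE A (Python) =====
-- def recover_sent(tokens, offsets):
--     """
--     recover sentence from a list of tokens and a list of token offsets
--     """
--     sent = ''
--     for i in range(len(tokens)-1):
--         sent += (tokens[i] + ' '*(offsets[i+1][0]-offsets[i][1]))
--     sent += tokens[-1]
--     return sent
--
-- def recover_tags(sent, offset):
--     new_sent = []
--     new_offset = []
--
--     found_tags = []
--
--     left = None
--
--     for i in range(len(sent)):
--
--         if sent[i] == '>' and left != None:
--             found_tags.append((left, i))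
--             left = None
--
--         if sent[i] == '<' or sent[i] == '</':
--             left = i
--
--     found_tags = sorted(found_tags, key=lambda x: x[0])
--
--     l = 0
--
--     for s,t in found_tags:
--
--         for i in range(l, s):
--             new_sent.append(sent[i])
--             new_offset.append(offset[i])
--
--         _tok = recover_sent(sent[s: t+1], offset[s: t+1])
--         _offset = (offset[s][0], offset[t][-1])
--         new_sent.append(_tok)
--         new_offset.append(_offset)
--
--         l = t+1
--
--     if l <= len(sent)-1:
--         for i in range(l, len(sent)):
--             new_sent.append(sent[i])
--             new_offset.append(offset[i])
--
--     return new_sent, new_offset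
-- ===== SOURCE B (Python) =====
-- def recover_sent(tokens, offsets):
--     """
--     recover sentence from a list of tokens and a list of token offsets
--     """
--     sent = ''
--     for i in range(len(tokens)-1):
--         sent += (tokens[i] + ' '*(offsets[i+1][0]-offsets[i][1]))
--     sent += tokens[-1]
--     return sent
--
-- def recover_tags(sent, offset):
--     # single pass: tentative span start; unmatched '<' spans are flushed as normal tokens
--     new_sent = []
--     new_offset = []
--     start = None
--     for i in range(len(sent)):
--         tok = sent[i]
--         if tok == '<' or tok == '</':
--             if start is not None:
--                 for j in range(start, i):
--                     new_sent.append(sent[j])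
--                     new_offset.append(offset[j])
--             start = i
--         elif tok == '>' and start is not None:
--             new_sent.append(recover_sent(sent[start:i+1], offset[start:i+1]))
--             new_offset.append((offset[start][0], offset[i][-1]))
--             start = None
--         elif start is None:
--             new_sent.append(tok)
--             new_offset.append(offset[i])
--     if start is not None:
--         for j in range(start, len(sent)):
--             new_sent.append(sent[j])
--             new_offset.append(offset[j])
--     return new_sent, new_offset
-- ===== Notes on version B (the rewrite author's own statement) =====
-- stated objective: alternative
-- what changed: Replaced A's two-phase collect-spans/sort/rebuild structure by a single pass over sent that keeps a tentative span start, flushing a superseded '<' as normal tokens and collapsing a span the moment its '>' arrives; the found_tags table, the sort and the separate rebuild loops disappear.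
import Mathlib
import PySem

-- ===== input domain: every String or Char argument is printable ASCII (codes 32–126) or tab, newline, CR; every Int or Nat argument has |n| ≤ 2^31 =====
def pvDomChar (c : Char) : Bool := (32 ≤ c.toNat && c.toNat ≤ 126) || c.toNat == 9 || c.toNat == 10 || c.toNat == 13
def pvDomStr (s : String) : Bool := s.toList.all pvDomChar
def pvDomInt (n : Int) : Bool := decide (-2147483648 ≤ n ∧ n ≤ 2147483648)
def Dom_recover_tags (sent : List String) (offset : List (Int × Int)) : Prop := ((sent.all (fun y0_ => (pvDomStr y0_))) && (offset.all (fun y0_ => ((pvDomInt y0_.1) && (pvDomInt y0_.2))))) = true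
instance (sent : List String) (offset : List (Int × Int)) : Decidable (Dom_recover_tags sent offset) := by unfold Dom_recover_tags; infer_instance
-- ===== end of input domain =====

-- B replaces A's collect-spans/sort/rebuild structure by one pass with a tentative span start (alternative decomposition, same results).


-- ===== PORT A =====
-- helper used by both Pythons (same module); built on List Char (PySem convention), exact for
-- nonempty token lists whose offset list is at least as long (the only way either Python calls it under Pre_).
def recover_sent (tokens : List String) (offsets : List (Int × Int)) : String :=
  String.ofList
    ((List.range (tokens.length - 1)).foldl
      (fun acc i =>
        acc ++ (tokens.getD i "").toList
            ++ List.replicate (((offsets.getD (i + 1) (0, 0)).1 - (offsets.getD i (0, 0)).2)).toNat ' ')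
      []
     ++ (PySem.List.pyGetD tokens (-1) "").toList)

-- for i in range(a, b): …append(sent[i]) / …append(offset[i])  (indices are in range wherever the loops run)
def pvNormS (sent : List String) (a b : Nat) : List String :=
  (List.range' a (b - a)).map (fun i => sent.getD i "")
def pvNormO (offset : List (Int × Int)) (a b : Nat) : List (Int × Int) :=
  (List.range' a (b - a)).map (fun i => offset.getD i (0, 0))

-- the collapsed token and its offset for a span [s, t] (shared text of both Pythons)
def pvSpanTok (sent : List String) (offset : List (Int × Int)) (s t : Nat) : String :=
  recover_sent (PySem.List.slice sent (some (s : Int)) (some ((t : Int) + 1)))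
               (PySem.List.slice offset (some (s : Int)) (some ((t : Int) + 1)))
def pvSpanOff (offset : List (Int × Int)) (s t : Nat) : Int × Int :=
  ((offset.getD s (0, 0)).1, (offset.getD t (0, 0)).2)

-- A, phase 1: one step of the tag-collecting loop (first the '>'-close update, then the '<'-open update)
def pvTagStep (sent : List String) (st : List (Nat × Nat) × Option Nat) (i : Nat) :
    List (Nat × Nat) × Option Nat :=
  if sent.getD i "" = "<" ∨ sent.getD i "" = "</" then
    ((if sent.getD i "" = ">" ∧ st.2 ≠ none then st.1 ++ [(st.2.getD 0, i)] else st.1), some i)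
  else if sent.getD i "" = ">" ∧ st.2 ≠ none then (st.1 ++ [(st.2.getD 0, i)], none)
  else st

-- A, phase 2: one step of the rebuild loop over found_tags (state: (new_sent, new_offset), l)
def pvEmitStep (sent : List String) (offset : List (Int × Int))
    (st : (List String × List (Int × Int)) × Nat) (p : Nat × Nat) :
    (List String × List (Int × Int)) × Nat :=
  ((st.1.1 ++ pvNormS sent st.2 p.1 ++ [pvSpanTok sent offset p.1 p.2],
    st.1.2 ++ pvNormO offset st.2 p.1 ++ [pvSpanOff offset p.1 p.2]), p.2 + 1)

-- A's state after both phases: found_tags collected, sorted, rebuilt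
def pvQ (sent : List String) (offset : List (Int × Int)) :
    (List String × List (Int × Int)) × Nat :=
  (PySem.List.sorted ((List.range sent.length).foldl (pvTagStep sent) ([], none)).1
      (fun x => x.1) false).foldl (pvEmitStep sent offset) (([], []), 0)

def recover_tags (sent : List String) (offset : List (Int × Int)) :
    List String × (List (Int × Int)) :=
  if ((pvQ sent offset).2 : Int) ≤ (sent.length : Int) - 1 then
    ((pvQ sent offset).1.1 ++ pvNormS sent (pvQ sent offset).2 sent.length,
     (pvQ sent offset).1.2 ++ pvNormO offset (pvQ sent offset).2 sent.length)
  else (pvQ sent offset).1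

-- ===== PORT B =====
-- one step of B's single pass (state: (new_sent, new_offset), tentative start)
def pvAltStep (sent : List String) (offset : List (Int × Int))
    (st : (List String × List (Int × Int)) × Option Nat) (i : Nat) :
    (List String × List (Int × Int)) × Option Nat :=
  if sent.getD i "" = "<" ∨ sent.getD i "" = "</" then
    (match st.2 with
     | some s => ((st.1.1 ++ pvNormS sent s i, st.1.2 ++ pvNormO offset s i), some i)
     | none => (st.1, some i))
  else if sent.getD i "" = ">" ∧ st.2 ≠ none then
    ((st.1.1 ++ [pvSpanTok sent offset (st.2.getD 0) i],
      st.1.2 ++ [pvSpanOff offset (st.2.getD 0) i]), none)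
  else if st.2 = none then
    ((st.1.1 ++ [sent.getD i ""], st.1.2 ++ [offset.getD i (0, 0)]), none)
  else st

-- B's state after its single pass
def pvBSt (sent : List String) (offset : List (Int × Int)) :
    (List String × List (Int × Int)) × Option Nat :=
  (List.range sent.length).foldl (pvAltStep sent offset) (([], []), none)

def recover_tags_alt (sent : List String) (offset : List (Int × Int)) :
    List String × (List (Int × Int)) :=
  match (pvBSt sent offset).2 with
  | some s =>
    ((pvBSt sent offset).1.1 ++ pvNormS sent s sent.length,
     (pvBSt sent offset).1.2 ++ pvNormO offset s sent.length)
  | none => (pvBSt sent offset).1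

-- ===== PRECONDITION & SPEC =====
-- Python A raises IndexError exactly when offset is shorter than sent (every token's offset is read);
-- Pre_ admits everything else.
def Pre_recover_tags (sent : List String) (offset : List (Int × Int)) : Prop :=
  sent.length ≤ offset.length
instance (sent : List String) (offset : List (Int × Int)) : Decidable (Pre_recover_tags sent offset) := by
  unfold Pre_recover_tags; infer_instance

def pvWitness_recover_tags : List String × (List (Int × Int)) :=
  (["a", "<", "b", ">", "c"], [(0, 1), (2, 3), (4, 5), (6, 7), (8, 9)])

def Spec_recover_tags (sent : List String) (offset : List (Int × Int))
    (out : List String × (List (Int × Int))) : Prop := out = recover_tags_alt sent offset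
instance (sent : List String) (offset : List (Int × Int)) (out : List String × (List (Int × Int))) :
    Decidable (Spec_recover_tags sent offset out) := by unfold Spec_recover_tags; infer_instance

-- ===== CLAIM (what is proved, stated in full; the proofs are below) =====
def Claim_equal_recover_tags : Prop :=
  ∀ (sent : List String) (offset : List (Int × Int)), Dom_recover_tags sent offset →
    Pre_recover_tags sent offset → Spec_recover_tags sent offset (recover_tags sent offset)

-- ===== LEMMAS AND PROOFS =====

-- l after folding pvEmitStep over tags (the third state component)
def pvL (tags : List (Nat × Nat)) : Nat := tags.foldl (fun _ p => p.2 + 1) 0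

-- (new_sent, new_offset) after folding pvEmitStep over tags
def pvE (sent : List String) (offset : List (Int × Int)) (tags : List (Nat × Nat)) :
    List String × List (Int × Int) :=
  (tags.foldl (pvEmitStep sent offset) (([], []), 0)).1

-- A's output shape: rebuilt spans followed by normal tokens up to n
def pvEmit (sent : List String) (offset : List (Int × Int)) (tags : List (Nat × Nat)) (n : Nat) :
    List String × List (Int × Int) :=
  ((pvE sent offset tags).1 ++ pvNormS sent (pvL tags) n,
   (pvE sent offset tags).2 ++ pvNormO offset (pvL tags) n)

-- invariant of A's phase-1 state after k steps
def pvInv (tags : List (Nat × Nat)) (left : Option Nat) (k : Nat) : Prop :=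
  tags.Pairwise (fun a b => a.2 < b.1) ∧
  (∀ p ∈ tags, p.1 < p.2 ∧ p.2 < k) ∧
  (∀ s, left = some s → s < k ∧ ∀ p ∈ tags, p.2 < s)

theorem pvL_append (tags : List (Nat × Nat)) (p : Nat × Nat) :
    pvL (tags ++ [p]) = p.2 + 1 := by
  simp [pvL, List.foldl_append]

theorem pvL_le (tags : List (Nat × Nat)) (m : Nat) (h : ∀ p ∈ tags, p.2 < m) :
    pvL tags ≤ m := by
  rcases List.eq_nil_or_concat tags with rfl | ⟨init, last, rfl⟩
  · simp [pvL]
  · rw [List.concat_eq_append, pvL_append]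
    exact h last (by simp)

theorem pvNormS_split (sent : List String) (a b c : Nat) (h1 : a ≤ b) (h2 : b ≤ c) :
    pvNormS sent a c = pvNormS sent a b ++ pvNormS sent b c := by
  unfold pvNormS
  rw [← List.map_append]
  congr 1
  rw [show c - a = (b - a) + (c - b) by omega, ← List.range'_append_1,
      show a + (b - a) = b by omega]

theorem pvNormO_split (offset : List (Int × Int)) (a b c : Nat) (h1 : a ≤ b) (h2 : b ≤ c) :
    pvNormO offset a c = pvNormO offset a b ++ pvNormO offset b c := by
  unfold pvNormO
  rw [← List.map_append]
  congr 1
  rw [show c - a = (b - a) + (c - b) by omega, ← List.range'_append_1,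
      show a + (b - a) = b by omega]

theorem pvNormS_nil (sent : List String) (a : Nat) : pvNormS sent a a = [] := by
  simp [pvNormS]

theorem pvNormO_nil (offset : List (Int × Int)) (a : Nat) : pvNormO offset a a = [] := by
  simp [pvNormO]

theorem pvNormS_one (sent : List String) (a : Nat) :
    pvNormS sent a (a + 1) = [sent.getD a ""] := by
  simp [pvNormS]

theorem pvNormO_one (offset : List (Int × Int)) (a : Nat) :
    pvNormO offset a (a + 1) = [offset.getD a (0, 0)] := by
  simp [pvNormO]

-- the third state component of A's rebuild fold is pvL
theorem pvE_snd (sent : List String) (offset : List (Int × Int)) (tags : List (Nat × Nat)) :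
    (tags.foldl (pvEmitStep sent offset) (([], []), 0)).2 = pvL tags := by
  unfold pvL
  generalize (([], []) : List String × List (Int × Int)) = x
  generalize (0 : Nat) = l
  induction tags generalizing x l with
  | nil => rfl
  | cons p tags ih => simp only [List.foldl_cons, pvEmitStep]; exact ih _ _

-- splitting pvEmit at a later point
theorem pvEmit_split (sent : List String) (offset : List (Int × Int)) (tags : List (Nat × Nat))
    (a b : Nat) (hL : pvL tags ≤ a) (hab : a ≤ b) :
    pvEmit sent offset tags b =
      ((pvEmit sent offset tags a).1 ++ pvNormS sent a b,
       (pvEmit sent offset tags a).2 ++ pvNormO offset a b) := by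
  unfold pvEmit
  rw [pvNormS_split sent (pvL tags) a b hL hab, pvNormO_split offset (pvL tags) a b hL hab]
  simp

-- appending one span to the tag list
theorem pvEmit_snoc (sent : List String) (offset : List (Int × Int)) (tags : List (Nat × Nat))
    (s t : Nat) :
    pvEmit sent offset (tags ++ [(s, t)]) (t + 1) =
      ((pvEmit sent offset tags s).1 ++ [pvSpanTok sent offset s t],
       (pvEmit sent offset tags s).2 ++ [pvSpanOff offset s t]) := by
  unfold pvEmit pvE
  rw [List.foldl_append, pvL_append]
  simp only [List.foldl_cons, List.foldl_nil, pvEmitStep, pvE_snd]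
  rw [pvNormS_nil, pvNormO_nil]
  simp

-- phase-1 invariant
theorem pvInv_holds (sent : List String) (k : Nat) :
    pvInv ((List.range k).foldl (pvTagStep sent) ([], none)).1
          ((List.range k).foldl (pvTagStep sent) ([], none)).2 k := by
  induction k with
  | zero => simp [pvInv]
  | succ k ih =>
    rw [List.range_succ, List.foldl_append]
    set st := (List.range k).foldl (pvTagStep sent) ([], none) with hst
    obtain ⟨h1, h2, h3⟩ := ih
    simp only [List.foldl_cons, List.foldl_nil]
    unfold pvTagStep
    split_ifs with hlt hgt hgt
    · -- tok is "<" or "</" and also ">": impossible inner condition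
      rcases hlt with h | h <;> rcases hgt with ⟨hg, _⟩ <;> rw [h] at hg <;> simp at hg
    · -- open a span, left := some k
      refine ⟨h1, ?_, ?_⟩
      · intro p hp; exact ⟨(h2 p hp).1, Nat.lt_succ_of_lt (h2 p hp).2⟩
      · intro s hs
        simp only [Option.some.injEq] at hs
        subst hs
        exact ⟨Nat.lt_succ_self k, fun p hp => (h2 p hp).2⟩
    · -- close a span, left := none
      rcases hgt with ⟨_, hne⟩
      obtain ⟨s, hs⟩ := Option.ne_none_iff_exists'.mp hne
      obtain ⟨hsk, hall⟩ := h3 s hs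
      refine ⟨?_, ?_, ?_⟩
      · rw [hs]
        simp only [Option.getD_some]
        refine List.pairwise_append.mpr ⟨h1, by simp, ?_⟩
        intro a ha b hb
        simp only [List.mem_singleton] at hb
        rw [hb]
        exact hall a ha
      · intro p hp
        rcases List.mem_append.mp hp with hp | hp
        · exact ⟨(h2 p hp).1, Nat.lt_succ_of_lt (h2 p hp).2⟩
        · simp only [List.mem_singleton] at hp
          rw [hp, hs]
          exact ⟨hsk, Nat.lt_succ_self k⟩
      · intro s' hs'
        simp at hs'
    · -- nothing happens
      refine ⟨h1, ?_, ?_⟩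
      · intro p hp; exact ⟨(h2 p hp).1, Nat.lt_succ_of_lt (h2 p hp).2⟩
      · intro s hs
        obtain ⟨hsk, hall⟩ := h3 s hs
        exact ⟨Nat.lt_succ_of_lt hsk, hall⟩

-- the single-pass state after k steps equals the phase-wise output on the prefix
theorem pvMain (sent : List String) (offset : List (Int × Int)) (k : Nat) :
    (List.range k).foldl (pvAltStep sent offset) (([], []), none) =
      (pvEmit sent offset ((List.range k).foldl (pvTagStep sent) ([], none)).1
        (match ((List.range k).foldl (pvTagStep sent) ([], none)).2 with
         | some s => s | none => k),
       ((List.range k).foldl (pvTagStep sent) ([], none)).2) := by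
  induction k with
  | zero => simp [pvEmit, pvE, pvL, pvNormS_nil, pvNormO_nil]
  | succ k ih =>
    have hinv := pvInv_holds sent k
    rw [List.range_succ, List.foldl_append, List.foldl_append, ih]
    set st := (List.range k).foldl (pvTagStep sent) ([], none) with hst
    obtain ⟨h1, h2, h3⟩ := hinv
    have hLk : pvL st.1 ≤ k := pvL_le st.1 k (fun p hp => (h2 p hp).2)
    simp only [List.foldl_cons, List.foldl_nil]
    unfold pvAltStep pvTagStep
    dsimp only
    split_ifs with hlt hgt hgt hnone
    · rcases hlt with h | h <;> rcases hgt with ⟨hg, _⟩ <;> rw [h] at hg <;> simp at hg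
    · -- tok is "<" or "</"
      cases hcase : st.2 with
      | some s =>
        obtain ⟨hsk, hall⟩ := h3 s hcase
        have hLs : pvL st.1 ≤ s := pvL_le st.1 s hall
        simp only
        rw [pvEmit_split sent offset st.1 s k hLs (Nat.le_of_lt hsk)]
      | none =>
        simp only
    · -- close a span
      rcases hgt with ⟨_, hne⟩
      obtain ⟨s, hs⟩ := Option.ne_none_iff_exists'.mp hne
      obtain ⟨hsk, hall⟩ := h3 s hs
      have hLs : pvL st.1 ≤ s := pvL_le st.1 s hall
      rw [hs]
      simp only [Option.getD_some]
      rw [pvEmit_snoc sent offset st.1 s k]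
    · -- normal token (or '>' with no start)
      rw [hnone]
      simp only
      rw [pvEmit_split sent offset st.1 k (k + 1) hLk (Nat.le_succ k),
          pvNormS_one, pvNormO_one]
    · -- other token inside a tentative span: state unchanged
      obtain ⟨s, hs⟩ := Option.ne_none_iff_exists'.mp hnone
      rw [hs]

-- the collected tag list is already sorted by its first component
theorem pvTags_sorted (sent : List String) (k : Nat) :
    PySem.List.sorted ((List.range k).foldl (pvTagStep sent) ([], none)).1
        (fun x => x.1) false =
      ((List.range k).foldl (pvTagStep sent) ([], none)).1 := by
  have hinv := pvInv_holds sent k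
  apply PySem.List.sorted_eq_of_perm_of_pairwise_lt
  · exact List.Perm.refl _
  · refine List.Pairwise.imp_of_mem ?_ hinv.1
    intro a b ha _ hab
    exact lt_trans (hinv.2.1 a ha).1 hab

-- ===== VERDICT (by name: the statement is the Claim_ definition above) =====
theorem recover_tags_spec : Claim_equal_recover_tags := by
  intro sent offset _ _
  unfold Spec_recover_tags recover_tags recover_tags_alt pvQ pvBSt
  rw [pvTags_sorted sent sent.length, pvMain sent offset sent.length]
  have hinv := pvInv_holds sent sent.length
  set st := (List.range sent.length).foldl (pvTagStep sent) ([], none) with hst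
  obtain ⟨h1, h2, h3⟩ := hinv
  have hL : pvL st.1 ≤ sent.length := pvL_le st.1 sent.length (fun p hp => (h2 p hp).2)
  rw [pvE_snd sent offset st.1]
  have hRHS :
      (match st.2 with
        | some s =>
          ((pvEmit sent offset st.1 (match st.2 with | some s => s | none => sent.length),
             st.2).1.1 ++ pvNormS sent s sent.length,
           (pvEmit sent offset st.1 (match st.2 with | some s => s | none => sent.length),
             st.2).1.2 ++ pvNormO offset s sent.length)
        | none =>
          (pvEmit sent offset st.1 (match st.2 with | some s => s | none => sent.length),
            st.2).1) =
      pvEmit sent offset st.1 sent.length := by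
    cases hcase : st.2 with
    | none => simp only
    | some s =>
      obtain ⟨hsk, hall⟩ := h3 s hcase
      have hLs : pvL st.1 ≤ s := pvL_le st.1 s hall
      simp only
      rw [pvEmit_split sent offset st.1 s sent.length hLs (Nat.le_of_lt hsk)]
  rw [hRHS]
  by_cases hlen : pvL st.1 < sent.length
  · rw [if_pos (by omega)]
    rfl
  · have hEq : pvL st.1 = sent.length := Nat.le_antisymm hL (Nat.le_of_not_lt hlen)
    rw [if_neg (by omega)]
    unfold pvEmit
    rw [hEq, pvNormS_nil, pvNormO_nil]
    simp [pvE]
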